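-- pv_equiv track=rewrite | github.com/dilaksdigit/CIE | backend/python/src/title/validation.py | suggest_title
-- ===== SOURCE A (Python) =====
-- from typing import Any
--
-- MAX_TITLE_LEN = 120
--
-- PIPE = "|"
--
-- def _norm_intent(primary_intent: str) -> str:
--     if not primary_intent or not primary_intent.strip():
--         return ""
--     return primary_intent.strip().lower().replace(" ", "_").replace("-", "_")
--
-- def _intent_phrase_templates(primary_intent: str) -> list[str]:
--     """Templates for the intent-led first segment (before pipe). Suggestion picks one or builds from product_type."""
--     key = _norm_intent(primary_intent)
--     templates = {
--         "problem_solving": ["{product_type} for {use_case}", "Warm Glare-Free {product_type} for {use_case}", "{product_type} — Solution for {use_case}"],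
--         "comparison": ["{product_type} — Compare Options for {use_case}", "{product_type} for {use_case}"],
--         "compatibility": ["{product_type} for Ceiling Lights — Safe Wiring Made Simple", "{product_type} — Fits {use_case}", "{product_type} for {use_case}"],
--         "specification": ["{product_type} — Technical Details for {use_case}", "{product_type} for {use_case}"],
--         "installation": ["{product_type} — Safe Installation for {use_case}", "How to Fit {product_type} for {use_case}"],
--         "troubleshooting": ["{product_type} to Fix {use_case} Issues", "{product_type} for {use_case}"],
--         "inspiration": ["Warm Diffused {product_type} for {use_case}", "{product_type} — Style and Design for {use_case}"],
--         "regulatory": ["{product_type} — Compliant and Safe for {use_case}", "Rated {product_type} for {use_case}"],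
--         "replacement": ["Replacement {product_type} for {use_case}", "{product_type} — Replace or Refill for {use_case}"],
--     }
--     return templates.get(key, ["{product_type} for {use_case}"])
--
-- def suggest_title(
--     cluster_id: str,
--     primary_intent: str,
--     attributes: dict[str, Any],
-- ) -> str:
--     """
--     Generate a CIE-compliant title: intent-led phrase before pipe, attributes after.
--
--     Attributes dict should include at least:
--     - product_type: e.g. "Pendant Cable Set", "Fabric Drum Lampshade", "LED Filament Bulb"
--     - use_case (optional): e.g. "Living Rooms", "Low Ceilings", "Ceiling Lights"
--     Plus any of: size, colour, fitting, style, wattage, etc. (joined after the pipe).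
--
--     Example:
--       suggest_title("CLU-CABLE-PENDANT-E27", "Compatibility", {
--         "product_type": "Pendant Cable Set",
--         "use_case": "Ceiling Lights",
--         "style": "3-Core Braided",
--         "size": "1m",
--         "fitting": "E27 Holder",
--       })
--       -> "Pendant Cable Set for Ceiling Lights — Safe Wiring Made Simple | 3-Core Braided 1m E27 Holder"
--     """
--     primary_intent = (primary_intent or "").strip()
--     product_type = (attributes.get("product_type") or attributes.get("product_type_label") or "Product").strip()
--     use_case = (attributes.get("use_case") or attributes.get("cluster_use_case") or "Your Setup").strip()
--
--     templates = _intent_phrase_templates(primary_intent)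
--     template = templates[0] if templates else "{product_type} for {use_case}"
--     before = template.format(product_type=product_type, use_case=use_case)
--
--     # Build attribute segment: order size, colour, fitting, style, etc.
--     attr_order = ["style", "colour", "color", "size", "wattage", "fitting", "cap", "finish", "material"]
--     after_parts: list[str] = []
--     seen_keys: set[str] = set()
--     for k in attr_order:
--         if k in attributes and attributes[k] not in (None, ""):
--             v = str(attributes[k]).strip()
--             if v and k not in seen_keys:
--                 after_parts.append(v)
--                 seen_keys.add(k)
--     for k, v in attributes.items():
--         if k in ("product_type", "product_type_label", "use_case", "cluster_use_case"):
--             continue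
--         if v is None or v == "":
--             continue
--         if k in seen_keys:
--             continue
--         v = str(v).strip()
--         if v:
--             after_parts.append(v)
--             seen_keys.add(k)
--
--     after = " ".join(after_parts) if after_parts else product_type
--
--     title = f"{before} {PIPE} {after}"
--     if len(title) > MAX_TITLE_LEN:
--         title = title[: MAX_TITLE_LEN - 3].rsplit(maxsplit=1)[0] + "..."
--     return title
-- ===== SOURCE B (Python) =====
-- MAX_TITLE_LEN = 120
--
-- PIPE = "|"
--
-- def _first_attr(attributes, keys, default):
--     for k in keys:
--         v = attributes.get(k)
--         if v:
--             return v
--     return default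
--
-- def suggest_title(cluster_id, primary_intent, attributes):
--     """Table-free variant: per-char intent normalisation, direct f-string per intent,
--     single bucket-binning pass over the attributes (no fixed-order lookups, no seen-set)."""
--     key = "".join("_" if c in " -" else c.lower() for c in (primary_intent or "").strip())
--     pt = _first_attr(attributes, ("product_type", "product_type_label"), "Product").strip()
--     uc = _first_attr(attributes, ("use_case", "cluster_use_case"), "Your Setup").strip()
--
--     if key == "problem_solving":
--         before = f"{pt} for {uc}"
--     elif key == "comparison":
--         before = f"{pt} — Compare Options for {uc}"
--     elif key == "compatibility":
--         before = f"{pt} for Ceiling Lights — Safe Wiring Made Simple"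
--     elif key == "specification":
--         before = f"{pt} — Technical Details for {uc}"
--     elif key == "installation":
--         before = f"{pt} — Safe Installation for {uc}"
--     elif key == "troubleshooting":
--         before = f"{pt} to Fix {uc} Issues"
--     elif key == "inspiration":
--         before = f"Warm Diffused {pt} for {uc}"
--     elif key == "regulatory":
--         before = f"{pt} — Compliant and Safe for {uc}"
--     elif key == "replacement":
--         before = f"Replacement {pt} for {uc}"
--     else:
--         before = f"{pt} for {uc}"
--
--     attr_order = ["style", "colour", "color", "size", "wattage", "fitting", "cap", "finish", "material"]
--     skip = ("product_type", "product_type_label", "use_case", "cluster_use_case")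
--     groups: dict[int, list[str]] = {}
--     for k, v in attributes.items():
--         if k in skip or v is None or v == "":
--             continue
--         t = str(v).strip()
--         if t:
--             p = attr_order.index(k) if k in attr_order else len(attr_order)
--             groups.setdefault(p, []).append(t)
--     after_parts = []
--     for p in range(len(attr_order) + 1):
--         after_parts.extend(groups.get(p, []))
--
--     after = " ".join(after_parts) if after_parts else pt
--     title = f"{before} {PIPE} {after}"
--     if len(title) > MAX_TITLE_LEN:
--         title = title[: MAX_TITLE_LEN - 3].rsplit(maxsplit=1)[0] + "..."
--     return title
-- ===== Notes on version B (the rewrite author's own statement) =====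
-- stated objective: alternative
-- what changed: Replaces A's template-dict lookup plus simultaneous str.format by direct per-intent f-strings, A's two-str.replace intent normalisation by one per-character map, and A's two-phase attribute pass (nine fixed-order lookups with a seen-set, then an insertion-order scan skipping seen keys) by a single scan binning each usable value into a priority bucket (attr_order index, sentinel for unlisted keys) concatenated in priority order.
import Mathlib
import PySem

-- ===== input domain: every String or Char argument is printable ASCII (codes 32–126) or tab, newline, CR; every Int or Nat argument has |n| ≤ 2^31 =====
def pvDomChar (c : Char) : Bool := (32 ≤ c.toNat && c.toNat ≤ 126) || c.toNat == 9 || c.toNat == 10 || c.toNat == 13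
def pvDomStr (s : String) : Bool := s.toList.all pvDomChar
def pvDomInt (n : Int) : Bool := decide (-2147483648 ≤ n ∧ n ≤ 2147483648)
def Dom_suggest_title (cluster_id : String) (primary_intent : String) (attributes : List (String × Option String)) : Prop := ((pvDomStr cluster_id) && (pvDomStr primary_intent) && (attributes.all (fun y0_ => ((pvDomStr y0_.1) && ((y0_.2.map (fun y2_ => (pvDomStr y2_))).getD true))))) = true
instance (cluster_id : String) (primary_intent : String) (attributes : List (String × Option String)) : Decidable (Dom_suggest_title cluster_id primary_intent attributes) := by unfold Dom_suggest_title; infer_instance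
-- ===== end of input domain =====

-- B replaces A's template-table lookup + simultaneous format by per-intent direct concatenations,
-- A's replace-chain intent normalisation by one per-character map, and A's two-phase attribute pass
-- (fixed-order lookups with a seen set, then an insertion-order scan) by a single pass binning
-- values into priority buckets; same return value (no argument is mutated).

-- ===== PORT A =====
-- module constants shared by both sources (identical literal lists in Source A and Source B)
def pvSkipKeys : List String := ["product_type", "product_type_label", "use_case", "cluster_use_case"]

def pvAttrOrder : List String := ["style", "colour", "color", "size", "wattage", "fitting", "cap", "finish", "material"]

-- _norm_intent (A: strip/lower then two str.replace passes)
def pvNormIntent (s : String) : String :=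
  if s = "" ∨ PySem.Str.strip s = "" then ""
  else PySem.Str.replace (PySem.Str.replace (PySem.Str.lower (PySem.Str.strip s)) " " "_") "-" "_"

-- _intent_phrase_templates (A: dict of template lists, .get with default)
def pvTemplates (primaryIntent : String) : List String :=
  let key := pvNormIntent primaryIntent
  (PySem.Dict.ofList [
    ("problem_solving", ["{product_type} for {use_case}", "Warm Glare-Free {product_type} for {use_case}", "{product_type} — Solution for {use_case}"]),
    ("comparison", ["{product_type} — Compare Options for {use_case}", "{product_type} for {use_case}"]),
    ("compatibility", ["{product_type} for Ceiling Lights — Safe Wiring Made Simple", "{product_type} — Fits {use_case}", "{product_type} for {use_case}"]),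
    ("specification", ["{product_type} — Technical Details for {use_case}", "{product_type} for {use_case}"]),
    ("installation", ["{product_type} — Safe Installation for {use_case}", "How to Fit {product_type} for {use_case}"]),
    ("troubleshooting", ["{product_type} to Fix {use_case} Issues", "{product_type} for {use_case}"]),
    ("inspiration", ["Warm Diffused {product_type} for {use_case}", "{product_type} — Style and Design for {use_case}"]),
    ("regulatory", ["{product_type} — Compliant and Safe for {use_case}", "Rated {product_type} for {use_case}"]),
    ("replacement", ["Replacement {product_type} for {use_case}", "{product_type} — Replace or Refill for {use_case}"])]).getD key ["{product_type} for {use_case}"]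

-- template.format(product_type=…, use_case=…): hand port (no PySem primitive); simultaneous
-- substitution of the two named fields — exact for the templates above, which use no other field.
def pvFmt (s pt uc : List Char) : List Char :=
  match s with
  | [] => []
  | c :: rest =>
    if "{product_type}".toList.isPrefixOf (c :: rest) then pt ++ pvFmt ((c :: rest).drop 14) pt uc
    else if "{use_case}".toList.isPrefixOf (c :: rest) then uc ++ pvFmt ((c :: rest).drop 10) pt uc
    else c :: pvFmt rest pt uc
termination_by s.length
decreasing_by all_goals (simp; try omega)

-- `x or y` for Optional[str] values in A's `(… or … or "Product")`
def pvOrStr (v : Option (Option String)) (dflt : String) : String :=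
  match v with
  | some (some s) => if s = "" then dflt else s
  | _ => dflt

-- s.rsplit(maxsplit=1)[0]: hand port (no PySem primitive); exact whenever s contains a
-- non-space character (always the case where it is used); [] on all-space s, where Python raises.
def pvRsplit1First (s : List Char) : List Char :=
  let rev := s.reverse.dropWhile PySem.Chars.isspace
  let rest := rev.dropWhile (fun c => !PySem.Chars.isspace c)
  let core := rest.dropWhile PySem.Chars.isspace
  if core.isEmpty then rev.reverse.dropWhile PySem.Chars.isspace else core.reverse

-- `title = f"{before} | {after}"` and the truncation (identical final lines of Source A and Source B)
def pvFinish (before after : List Char) : String :=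
  let title := before ++ [' ', '|', ' '] ++ after
  if 120 < title.length then String.ofList (pvRsplit1First (title.take 117) ++ ['.', '.', '.'])
  else String.ofList title

def suggest_title (cluster_id : String) (primary_intent : String) (attributes : List (String × Option String)) : String :=
  let pi := PySem.Str.strip primary_intent
  let d : PySem.Dict String (Option String) := PySem.Dict.ofList attributes
  let productType := PySem.Str.strip (pvOrStr (d.get? "product_type") (pvOrStr (d.get? "product_type_label") "Product"))
  let useCase := PySem.Str.strip (pvOrStr (d.get? "use_case") (pvOrStr (d.get? "cluster_use_case") "Your Setup"))
  let templates := pvTemplates pi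
  let template := match templates with | t :: _ => t | [] => "{product_type} for {use_case}"
  let before := pvFmt template.toList productType.toList useCase.toList
  -- first loop: fixed attr_order lookups, threading (after_parts, seen_keys)
  let st1 : List String × PySem.Set String := pvAttrOrder.foldl (fun st k =>
      match d.get? k with
      | some (some s) =>
        if s = "" then st
        else
          let v := PySem.Str.strip s
          if v ≠ "" ∧ k ∉ st.2 then (st.1 ++ [v], st.2.add k) else st
      | _ => st) ([], PySem.Set.ofList [])
  -- second loop: insertion-order scan of attributes.items()
  let st2 := d.items.foldl (fun st kv =>
      if kv.1 ∈ pvSkipKeys then st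
      else match kv.2 with
      | none => st
      | some s =>
        if s = "" then st
        else if kv.1 ∈ st.2 then st
        else
          let v := PySem.Str.strip s
          if v ≠ "" then (st.1 ++ [v], st.2.add kv.1) else st) st1
  let after := if st2.1 ≠ [] then PySem.Str.join " " st2.1 else productType
  pvFinish before after.toList

-- ===== PORT B =====
-- one character of B's intent normalisation: '_' for space/hyphen, lowercase otherwise
def pvNormChar (c : Char) : Char := if c = ' ' ∨ c = '-' then '_' else PySem.Chars.lowerChar c

-- B's _first_attr: first truthy attributes.get(k) over keys, else the default
def pvFirstVal (d : PySem.Dict String (Option String)) : List String → String → String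
  | [], dflt => dflt
  | k :: rest, dflt =>
    match d.get? k with
    | some (some s) => if s = "" then pvFirstVal d rest dflt else s
    | _ => pvFirstVal d rest dflt

def suggest_title_alt (cluster_id : String) (primary_intent : String) (attributes : List (String × Option String)) : String :=
  let d : PySem.Dict String (Option String) := PySem.Dict.ofList attributes
  let key := String.ofList (((PySem.Str.strip primary_intent).toList).map pvNormChar)
  let pt := PySem.Str.strip (pvFirstVal d ["product_type", "product_type_label"] "Product")
  let uc := PySem.Str.strip (pvFirstVal d ["use_case", "cluster_use_case"] "Your Setup")
  let p := pt.toList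
  let u := uc.toList
  -- direct per-intent f-strings, no template table
  let before :=
    if key = "problem_solving" then p ++ " for ".toList ++ u
    else if key = "comparison" then p ++ " — Compare Options for ".toList ++ u
    else if key = "compatibility" then p ++ " for Ceiling Lights — Safe Wiring Made Simple".toList
    else if key = "specification" then p ++ " — Technical Details for ".toList ++ u
    else if key = "installation" then p ++ " — Safe Installation for ".toList ++ u
    else if key = "troubleshooting" then p ++ " to Fix ".toList ++ u ++ " Issues".toList
    else if key = "inspiration" then "Warm Diffused ".toList ++ p ++ " for ".toList ++ u
    else if key = "regulatory" then p ++ " — Compliant and Safe for ".toList ++ u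
    else if key = "replacement" then "Replacement ".toList ++ p ++ " for ".toList ++ u
    else p ++ " for ".toList ++ u
  -- one pass: bin each usable value under its priority (attr_order index, sentinel 9 for the rest)
  let groups : PySem.Dict Int (List String) := d.items.foldl (fun g kv =>
      if kv.1 ∈ pvSkipKeys then g
      else match kv.2 with
      | none => g
      | some s =>
        if s = "" then g
        else
          let t := PySem.Str.strip s
          if t ≠ "" then g.modify (pvAttrOrder.idxOf kv.1 : Int) [] (· ++ [t]) else g)
    PySem.Dict.empty
  -- concatenate the buckets in priority order
  let afterParts := (PySem.List.pyRange 0 (pvAttrOrder.length + 1) 1).foldl (fun acc p => acc ++ groups.getD p []) []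
  let after := if afterParts ≠ [] then PySem.Str.join " " afterParts else pt
  pvFinish before after.toList

-- ===== PRECONDITION & SPEC =====
def Spec_suggest_title (cluster_id : String) (primary_intent : String) (attributes : List (String × Option String)) (out : String) : Prop := out = suggest_title_alt cluster_id primary_intent attributes
instance (cluster_id : String) (primary_intent : String) (attributes : List (String × Option String)) (out : String) : Decidable (Spec_suggest_title cluster_id primary_intent attributes out) := by unfold Spec_suggest_title; infer_instance

-- ===== CLAIM (what is proved, stated in full; the proofs are below) =====
def Claim_equal_suggest_title : Prop := ∀ (cluster_id : String) (primary_intent : String) (attributes : List (String × Option String)), Dom_suggest_title cluster_id primary_intent attributes → Spec_suggest_title cluster_id primary_intent attributes (suggest_title cluster_id primary_intent attributes)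

-- ===== LEMMAS AND PROOFS =====

-- ---- the intent key: A's replace-chain equals B's per-character map ----

theorem pv_replace_single (a b : Char) (l : List Char) :
    PySem.Chars.replace l [a] [b] = l.map (fun c => if c = a then b else c) := by
  suffices h : ∀ (fuel : Nat) (l acc : List Char), l.length ≤ fuel →
      PySem.Chars.replace.go [a] [b] fuel l acc = acc.reverse ++ l.map (fun c => if c = a then b else c) by
    simp [PySem.Chars.replace]
    exact (h l.length l [] le_rfl).trans (by simp)
  intro fuel
  induction fuel with
  | zero =>
    intro l acc h
    have : l = [] := List.length_eq_zero_iff.mp (Nat.le_zero.mp h)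
    subst this
    simp [PySem.Chars.replace.go]
  | succ n ih =>
    intro l acc h
    cases l with
    | nil => simp [PySem.Chars.replace.go]
    | cons c t =>
      simp only [PySem.Chars.replace.go]
      by_cases hc : c = a
      · subst hc
        have : [c].isPrefixOf (c :: t) = true := by simp [List.isPrefixOf]
        simp [this, ih t _ (by simpa using h)]
      · have : [a].isPrefixOf (c :: t) = false := by simp [List.isPrefixOf, Ne.symm hc]
        simp [this, hc, ih t _ (by simpa using h)]

theorem pv_rstrip_idem (l : List Char) : PySem.Chars.rstrip (PySem.Chars.rstrip l) = PySem.Chars.rstrip l := by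
  simp [PySem.Chars.rstrip, List.dropWhile_idempotent]

theorem pv_lstrip_rstrip_lstrip (l : List Char) :
    PySem.Chars.lstrip (PySem.Chars.rstrip (PySem.Chars.lstrip l)) = PySem.Chars.rstrip (PySem.Chars.lstrip l) := by
  cases hr : PySem.Chars.rstrip (PySem.Chars.lstrip l) with
  | nil => simp [PySem.Chars.lstrip]
  | cons y ys =>
    have hpre : PySem.Chars.rstrip (PySem.Chars.lstrip l) <+: PySem.Chars.lstrip l := by
      have hs : List.dropWhile PySem.Chars.isspace (PySem.Chars.lstrip l).reverse <:+ (PySem.Chars.lstrip l).reverse :=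
        List.dropWhile_suffix _
      have := List.reverse_prefix.mpr (by simpa using hs)
      simpa [PySem.Chars.rstrip] using this
    rw [hr] at hpre
    obtain ⟨t, ht⟩ := hpre
    have hy : PySem.Chars.isspace y = false := by
      have h2 := List.head?_dropWhile_not PySem.Chars.isspace l
      rw [show List.dropWhile PySem.Chars.isspace l = y :: (ys ++ t) from ht.symm] at h2
      simpa using h2
    simp [PySem.Chars.lstrip, hy]

theorem pv_strip_idem (l : List Char) : PySem.Chars.strip (PySem.Chars.strip l) = PySem.Chars.strip l := by
  rw [PySem.Chars.strip, PySem.Chars.strip, pv_lstrip_rstrip_lstrip, pv_rstrip_idem]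

theorem pv_norm_char (c : Char) :
    (fun d => if d = '-' then '_' else d) ((fun d => if d = ' ' then '_' else d) (PySem.Chars.lowerChar c)) = pvNormChar c := by
  by_cases h1 : c = ' '
  · subst h1; decide
  by_cases h2 : c = '-'
  · subst h2; decide
  have hl : PySem.Chars.lowerChar c ≠ ' ' ∧ PySem.Chars.lowerChar c ≠ '-' := by
    unfold PySem.Chars.lowerChar PySem.Chars.isupper
    split
    · rename_i h
      obtain ⟨ha, hz⟩ := by simpa using h
      have ha' : 65 ≤ c.toNat := Nat.succ_le_of_lt ha
      have hz' : c.toNat ≤ 90 := Nat.le_of_lt_succ (Nat.lt_succ_of_le hz)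
      have hv : (Char.ofNat (c.toNat + 32)).toNat = c.toNat + 32 := by
        rw [Char.toNat_ofNat, if_pos]
        left; omega
      refine ⟨fun he => ?_, fun he => ?_⟩
      · have h3 := congrArg Char.toNat he
        rw [hv] at h3
        simp only [show (' ' : Char).toNat = 32 from rfl] at h3
        omega
      · have h3 := congrArg Char.toNat he
        rw [hv] at h3
        simp only [show ('-' : Char).toNat = 45 from rfl] at h3
        omega
    · exact ⟨h1, h2⟩
  simp only []
  rw [if_neg hl.1, if_neg hl.2]
  simp [pvNormChar, h1, h2]

theorem pv_key_eq (s : String) :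
    String.ofList (((PySem.Str.strip s).toList).map pvNormChar) = pvNormIntent (PySem.Str.strip s) := by
  have hts : PySem.Str.strip (PySem.Str.strip s) = PySem.Str.strip s := by
    simp only [PySem.Str.strip, String.toList_ofList]
    rw [pv_strip_idem]
  by_cases h0 : PySem.Str.strip s = ""
  · rw [pvNormIntent, if_pos (Or.inl h0), h0]
    decide
  · rw [pvNormIntent, if_neg (by simp [h0, hts])]
    rw [hts]
    simp only [PySem.Str.replace, PySem.Str.lower, String.toList_ofList]
    refine congrArg String.ofList ?_
    rw [show (" " : String).toList = [' '] from rfl, show ("-" : String).toList = ['-'] from rfl,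
      show ("_" : String).toList = ['_'] from rfl]
    rw [pv_replace_single, pv_replace_single, PySem.Chars.lower, List.map_map, List.map_map]
    refine List.map_congr_left (fun c _ => ?_)
    simp only [Function.comp]
    exact (pv_norm_char c).symm

-- ---- the first segment: A's table + format equals B's direct branches ----

theorem pvTemplates_cases (s : String) :
    pvTemplates s =
      (if pvNormIntent s = "problem_solving" then ["{product_type} for {use_case}", "Warm Glare-Free {product_type} for {use_case}", "{product_type} — Solution for {use_case}"]
       else if pvNormIntent s = "comparison" then ["{product_type} — Compare Options for {use_case}", "{product_type} for {use_case}"]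
       else if pvNormIntent s = "compatibility" then ["{product_type} for Ceiling Lights — Safe Wiring Made Simple", "{product_type} — Fits {use_case}", "{product_type} for {use_case}"]
       else if pvNormIntent s = "specification" then ["{product_type} — Technical Details for {use_case}", "{product_type} for {use_case}"]
       else if pvNormIntent s = "installation" then ["{product_type} — Safe Installation for {use_case}", "How to Fit {product_type} for {use_case}"]
       else if pvNormIntent s = "troubleshooting" then ["{product_type} to Fix {use_case} Issues", "{product_type} for {use_case}"]
       else if pvNormIntent s = "inspiration" then ["Warm Diffused {product_type} for {use_case}", "{product_type} — Style and Design for {use_case}"]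
       else if pvNormIntent s = "regulatory" then ["{product_type} — Compliant and Safe for {use_case}", "Rated {product_type} for {use_case}"]
       else if pvNormIntent s = "replacement" then ["Replacement {product_type} for {use_case}", "{product_type} — Replace or Refill for {use_case}"]
       else ["{product_type} for {use_case}"]) := by
  unfold pvTemplates
  set k := pvNormIntent s with hk
  clear_value k
  by_cases h1 : k = "problem_solving"
  · subst h1; decide
  rw [if_neg h1]
  by_cases h2 : k = "comparison"
  · subst h2; decide
  rw [if_neg h2]
  by_cases h3 : k = "compatibility"
  · subst h3; decide
  rw [if_neg h3]
  by_cases h4 : k = "specification"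
  · subst h4; decide
  rw [if_neg h4]
  by_cases h5 : k = "installation"
  · subst h5; decide
  rw [if_neg h5]
  by_cases h6 : k = "troubleshooting"
  · subst h6; decide
  rw [if_neg h6]
  by_cases h7 : k = "inspiration"
  · subst h7; decide
  rw [if_neg h7]
  by_cases h8 : k = "regulatory"
  · subst h8; decide
  rw [if_neg h8]
  by_cases h9 : k = "replacement"
  · subst h9; decide
  rw [if_neg h9]
  have b : ∀ (x : String), ¬ k = x → (x == k) = false := fun x hx => beq_eq_false_iff_ne.mpr (Ne.symm hx)
  simp [PySem.Dict.getD, PySem.Dict.get?, PySem.Dict.ofList, PySem.Dict.update, PySem.Dict.empty,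
    PySem.Dict.insert, PySem.Dict.contains, List.find?, b _ h1, b _ h2, b _ h3, b _ h4, b _ h5,
    b _ h6, b _ h7, b _ h8, b _ h9]

theorem pv_before_eq (pi : String) (p u : List Char) :
    pvFmt (match pvTemplates (PySem.Str.strip pi) with | t :: _ => t | [] => "{product_type} for {use_case}").toList p u
    = (if String.ofList (((PySem.Str.strip pi).toList).map pvNormChar) = "problem_solving" then p ++ " for ".toList ++ u
       else if String.ofList (((PySem.Str.strip pi).toList).map pvNormChar) = "comparison" then p ++ " — Compare Options for ".toList ++ u
       else if String.ofList (((PySem.Str.strip pi).toList).map pvNormChar) = "compatibility" then p ++ " for Ceiling Lights — Safe Wiring Made Simple".toList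
       else if String.ofList (((PySem.Str.strip pi).toList).map pvNormChar) = "specification" then p ++ " — Technical Details for ".toList ++ u
       else if String.ofList (((PySem.Str.strip pi).toList).map pvNormChar) = "installation" then p ++ " — Safe Installation for ".toList ++ u
       else if String.ofList (((PySem.Str.strip pi).toList).map pvNormChar) = "troubleshooting" then p ++ " to Fix ".toList ++ u ++ " Issues".toList
       else if String.ofList (((PySem.Str.strip pi).toList).map pvNormChar) = "inspiration" then "Warm Diffused ".toList ++ p ++ " for ".toList ++ u
       else if String.ofList (((PySem.Str.strip pi).toList).map pvNormChar) = "regulatory" then p ++ " — Compliant and Safe for ".toList ++ u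
       else if String.ofList (((PySem.Str.strip pi).toList).map pvNormChar) = "replacement" then "Replacement ".toList ++ p ++ " for ".toList ++ u
       else p ++ " for ".toList ++ u) := by
  rw [pv_key_eq, pvTemplates_cases]
  set k := pvNormIntent (PySem.Str.strip pi) with hk
  clear_value k
  by_cases h1 : k = "problem_solving"
  · subst h1; simp [pvFmt]
  rw [if_neg h1, if_neg h1]
  by_cases h2 : k = "comparison"
  · subst h2; simp [pvFmt]
  rw [if_neg h2, if_neg h2]
  by_cases h3 : k = "compatibility"
  · subst h3; simp [pvFmt]
  rw [if_neg h3, if_neg h3]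
  by_cases h4 : k = "specification"
  · subst h4; simp [pvFmt]
  rw [if_neg h4, if_neg h4]
  by_cases h5 : k = "installation"
  · subst h5; simp [pvFmt]
  rw [if_neg h5, if_neg h5]
  by_cases h6 : k = "troubleshooting"
  · subst h6; simp [pvFmt]
  rw [if_neg h6, if_neg h6]
  by_cases h7 : k = "inspiration"
  · subst h7; simp [pvFmt]
  rw [if_neg h7, if_neg h7]
  by_cases h8 : k = "regulatory"
  · subst h8; simp [pvFmt]
  rw [if_neg h8, if_neg h8]
  by_cases h9 : k = "replacement"
  · subst h9; simp [pvFmt]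
  rw [if_neg h9, if_neg h9]
  simp [pvFmt]

-- ---- the default chains: B's first-truthy scan equals A's nested `or` ----

theorem pv_first_val (d : PySem.Dict String (Option String)) (k1 k2 dflt : String) :
    pvFirstVal d [k1, k2] dflt = pvOrStr (d.get? k1) (pvOrStr (d.get? k2) dflt) := by
  rcases hg1 : d.get? k1 with _ | v1
  · rcases hg2 : d.get? k2 with _ | v2
    · simp [pvFirstVal, hg1, hg2, pvOrStr]
    · rcases v2 with _ | s2 <;> simp [pvFirstVal, hg1, hg2, pvOrStr]
  · rcases v1 with _ | s1
    · rcases hg2 : d.get? k2 with _ | v2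
      · simp [pvFirstVal, hg1, hg2, pvOrStr]
      · rcases v2 with _ | s2 <;> simp [pvFirstVal, hg1, hg2, pvOrStr]
    · by_cases hs1 : s1 = ""
      · subst hs1
        rcases hg2 : d.get? k2 with _ | v2
        · simp [pvFirstVal, hg1, hg2, pvOrStr]
        · rcases v2 with _ | s2 <;> simp [pvFirstVal, hg1, hg2, pvOrStr]
      · simp [pvFirstVal, hg1, pvOrStr, hs1]

-- ---- the attribute segment (unchanged machinery) ----

-- value normalisation shared by both Python loops: None/"" rejected, else stripped, "" rejected
def pvVal? (v : Option String) : Option String :=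
  match v with
  | none => none
  | some s => if s = "" then none else (if PySem.Str.strip s = "" then none else some (PySem.Str.strip s))

-- dict lookup composed with the value normalisation
def pvLk (d : PySem.Dict String (Option String)) (k : String) : Option String :=
  (d.get? k).bind pvVal?

-- the (priority, stripped value) pair B's single pass produces for one item
def pvToPair (kv : String × Option String) : Option (Int × String) :=
  if kv.1 ∈ pvSkipKeys then none else (pvVal? kv.2).map (fun t => ((pvAttrOrder.idxOf kv.1 : Int), t))

theorem pv_filterMap_eq_flatMap {α β : Type} (f : α → Option β) (l : List α) :
    l.filterMap f = l.flatMap (fun x => (f x).toList) := by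
  induction l with
  | nil => simp
  | cons x xs ih => cases h : f x <;> simp [h, ih]

theorem pv_set_add_not_mem (s : PySem.Set String) (x : String) (h : x ∉ s) :
    s.add x = s ++ [x] := by
  simp [PySem.Set.add, h]

theorem pv_if_opt_congr {c d : Prop} [Decidable c] [Decidable d] (h : c ↔ d) (x : Option String) :
    (if c then none else x) = (if d then none else x) := if_congr h rfl rfl

-- A's first loop: appends the normalised value of each listed key, records the used keys
theorem pv_loopA1 (d : PySem.Dict String (Option String)) (ks : List String) :
    ∀ (parts : List String) (seen : PySem.Set String), ks.Nodup → (∀ k ∈ ks, k ∉ seen) →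
    ks.foldl (fun st k =>
      match d.get? k with
      | some (some s) =>
        if s = "" then st
        else
          let v := PySem.Str.strip s
          if v ≠ "" ∧ k ∉ st.2 then (st.1 ++ [v], st.2.add k) else st
      | _ => st) (parts, seen)
    = (parts ++ ks.filterMap (pvLk d), seen ++ ks.filter (fun k => (pvLk d k).isSome)) := by
  induction ks with
  | nil => intro parts seen _ _; simp
  | cons k ks ih =>
    intro parts seen hnd hs
    have hk : k ∉ seen := hs k (by simp)
    have hnd' := List.nodup_cons.mp hnd
    have hs' : ∀ x ∈ ks, x ∉ seen := fun x hx => hs x (by simp [hx])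
    simp only [List.foldl_cons, List.filterMap_cons, List.filter_cons]
    cases hg : d.get? k with
    | none =>
      have hlk : pvLk d k = none := by simp [pvLk, hg]
      simp only [hlk, Option.isSome_none]
      rw [ih parts seen hnd'.2 hs']
      simp
    | some v =>
      cases v with
      | none =>
        have hlk : pvLk d k = none := by simp [pvLk, hg, pvVal?]
        simp only [hlk, Option.isSome_none]
        rw [ih parts seen hnd'.2 hs']
        simp
      | some s =>
        by_cases hs0 : s = ""
        · have hlk : pvLk d k = none := by simp [pvLk, hg, pvVal?, hs0]
          simp only [hlk, Option.isSome_none, if_pos hs0]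
          rw [ih parts seen hnd'.2 hs']
          simp
        · by_cases hv : PySem.Str.strip s = ""
          · have hlk : pvLk d k = none := by simp [pvLk, hg, pvVal?, hs0, hv]
            simp only [hlk, Option.isSome_none, if_neg hs0]
            have : ¬ (PySem.Str.strip s ≠ "" ∧ k ∉ seen) := by simp [hv]
            simp only [this, ite_false]
            rw [ih parts seen hnd'.2 hs']
            simp
          · have hlk : pvLk d k = some (PySem.Str.strip s) := by
              simp [pvLk, hg, pvVal?, hs0, hv]
            have hcond : (PySem.Str.strip s ≠ "" ∧ k ∉ seen) := ⟨hv, hk⟩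
            simp only [hlk, Option.isSome_some, if_neg hs0, if_pos hcond]
            rw [pv_set_add_not_mem seen k hk]
            have hs'' : ∀ x ∈ ks, x ∉ seen ++ [k] := by
              intro x hx
              simp only [List.mem_append, List.mem_singleton]
              rintro (h1 | rfl)
              · exact hs' x hx h1
              · exact hnd'.1 hx
            rw [ih (parts ++ [PySem.Str.strip s]) (seen ++ [k]) hnd'.2 hs'']
            simp

-- A's second loop: appends remaining usable values in insertion order (keys unique)
theorem pv_loopA2 (l : List (String × Option String)) :
    ∀ (parts : List String) (seen : PySem.Set String), (l.map (fun p => p.1)).Nodup →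
    (l.foldl (fun st kv =>
      if kv.1 ∈ pvSkipKeys then st
      else match kv.2 with
      | none => st
      | some s =>
        if s = "" then st
        else if kv.1 ∈ st.2 then st
        else
          let v := PySem.Str.strip s
          if v ≠ "" then (st.1 ++ [v], st.2.add kv.1) else st) (parts, seen)).1
    = parts ++ l.filterMap (fun kv => if kv.1 ∈ pvSkipKeys ∨ kv.1 ∈ seen then none else pvVal? kv.2) := by
  induction l with
  | nil => intro parts seen _; simp
  | cons kv tl ih =>
    intro parts seen hnd
    have hnd' : (tl.map (fun p => p.1)).Nodup := (List.nodup_cons.mp hnd).2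
    have hhd : kv.1 ∉ tl.map (fun p => p.1) := (List.nodup_cons.mp hnd).1
    simp only [List.foldl_cons, List.filterMap_cons]
    by_cases hskip : kv.1 ∈ pvSkipKeys
    · simp only [if_pos hskip, if_pos (Or.inl hskip)]
      rw [ih parts seen hnd']
    · simp only [if_neg hskip]
      cases hv : kv.2 with
      | none =>
        rw [ih parts seen hnd']
        simp [pvVal?]
      | some s =>
        by_cases hs0 : s = ""
        · simp only [if_pos hs0]
          rw [ih parts seen hnd']
          simp [pvVal?, hs0]
        · simp only [if_neg hs0]
          by_cases hmem : kv.1 ∈ seen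
          · simp only [if_pos hmem]
            rw [ih parts seen hnd']
            simp [hmem]
          · simp only [if_neg hmem]
            by_cases hstr : PySem.Str.strip s = ""
            · have hc : ¬ (PySem.Str.strip s ≠ "") := by simp [hstr]
              simp only [hc, ite_false]
              rw [ih parts seen hnd']
              simp [pvVal?, hs0, hstr]
            · simp only [if_pos (show PySem.Str.strip s ≠ "" from hstr)]
              rw [ih (parts ++ [PySem.Str.strip s]) (seen.add kv.1) hnd']
              rw [List.filterMap_congr
                (g := fun kv => if kv.1 ∈ pvSkipKeys ∨ kv.1 ∈ seen then none else pvVal? kv.2)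
                (fun x hx => by
                  refine pv_if_opt_congr (or_congr Iff.rfl ?_) _
                  have hne : x.1 ≠ kv.1 := fun he => hhd (he ▸ List.mem_map.mpr ⟨x, hx, rfl⟩)
                  rw [PySem.Set.mem_add]
                  simp [hne])]
              have hval : (if kv.1 ∈ pvSkipKeys ∨ kv.1 ∈ seen then none
                  else pvVal? (some s)) = some (PySem.Str.strip s) := by
                simp [pvVal?, hs0, hstr, hskip, hmem]
              simp [hval]

-- B's single pass rewritten as: build the pair list, then fold the modify step over it
theorem pv_loopB (l : List (String × Option String)) :
    ∀ (g : PySem.Dict Int (List String)),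
    l.foldl (fun g kv =>
      if kv.1 ∈ pvSkipKeys then g
      else match kv.2 with
      | none => g
      | some s =>
        if s = "" then g
        else
          let t := PySem.Str.strip s
          if t ≠ "" then g.modify (pvAttrOrder.idxOf kv.1 : Int) [] (· ++ [t]) else g) g
    = (l.filterMap pvToPair).foldl (fun g q => g.modify q.1 [] (· ++ [q.2])) g := by
  induction l with
  | nil => intro g; simp
  | cons kv tl ih =>
    intro g
    simp only [List.foldl_cons, List.filterMap_cons]
    by_cases hskip : kv.1 ∈ pvSkipKeys
    · have : pvToPair kv = none := by simp [pvToPair, hskip]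
      simp only [if_pos hskip, this]
      exact ih g
    · simp only [if_neg hskip]
      cases hv : kv.2 with
      | none =>
        have : pvToPair kv = none := by simp [pvToPair, hskip, hv, pvVal?]
        simp only [this]
        exact ih g
      | some s =>
        by_cases hs0 : s = ""
        · have : pvToPair kv = none := by simp [pvToPair, hskip, hv, pvVal?, hs0]
          simp only [this, if_pos hs0]
          exact ih g
        · by_cases hstr : PySem.Str.strip s = ""
          · have : pvToPair kv = none := by simp [pvToPair, hskip, hv, pvVal?, hs0, hstr]
            have hc : ¬ (PySem.Str.strip s ≠ "") := by simp [hstr]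
            simp only [this, if_neg hs0, hc, ite_false]
            exact ih g
          · have : pvToPair kv = some ((pvAttrOrder.idxOf kv.1 : Int), PySem.Str.strip s) := by
              simp [pvToPair, hskip, hv, pvVal?, hs0, hstr]
            simp only [this, if_neg hs0, ne_eq, hstr, not_false_iff, if_pos, List.foldl_cons]
            exact ih _

-- one fixed key: the insertion-order scan restricted to that key is exactly the dict lookup
theorem pv_single (key : String) (l : List (String × Option String)) :
    (l.map (fun p => p.1)).Nodup →
    l.filterMap (fun kv => if kv.1 = key then pvVal? kv.2 else none)
    = (((PySem.Dict.mk l).get? key).bind pvVal?).toList := by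
  induction l with
  | nil =>
    intro _
    simp [PySem.Dict.get?]
  | cons kv tl ih =>
    intro hnd
    have hnd' : (tl.map (fun p => p.1)).Nodup := (List.nodup_cons.mp hnd).2
    have hhd : kv.1 ∉ tl.map (fun p => p.1) := (List.nodup_cons.mp hnd).1
    obtain ⟨k, v⟩ := kv
    rw [List.filterMap_cons]
    rw [show (PySem.Dict.mk ((k, v) :: tl)) = { items := (k, v) :: tl } from rfl,
      PySem.Dict.get?_mk_cons]
    by_cases h : k = key
    · subst h
      have htl : tl.filterMap (fun kv => if kv.1 = k then pvVal? kv.2 else none) = [] := by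
        rw [List.filterMap_eq_nil_iff]
        intro a ha
        have : a.1 ≠ k := by
          intro he
          exact hhd (he ▸ List.mem_map.mpr ⟨a, ha, rfl⟩)
        simp [this]
      simp only [beq_self_eq_true, if_pos, htl]
      cases hpv : pvVal? v <;> simp [hpv]
    · have hbeq : (k == key) = false := by simp [h]
      simp only [h, if_false, hbeq, Bool.false_eq_true]
      exact ih hnd'

-- the sentinel bucket holds exactly the non-listed, non-skipped values
theorem pv_bucket9_fun (kv : String × Option String) :
    ((pvToPair kv).filter (fun p => p.1 == (9 : Int))).map (fun x => x.2)
    = (if kv.1 ∈ pvSkipKeys ∨ kv.1 ∈ pvAttrOrder then none else pvVal? kv.2) := by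
  by_cases hskip : kv.1 ∈ pvSkipKeys
  · simp [pvToPair, hskip]
  · by_cases hmem : kv.1 ∈ pvAttrOrder
    · have hlt : pvAttrOrder.idxOf kv.1 < pvAttrOrder.length := List.idxOf_lt_length_iff.mpr hmem
      have hne : ((pvAttrOrder.idxOf kv.1 : Int) == (9 : Int)) = false := by
        have : pvAttrOrder.idxOf kv.1 < 9 := by simpa [pvAttrOrder] using hlt
        simp; omega
      cases hpv : pvVal? kv.2 <;>
        simp [pvToPair, hskip, hmem, hpv, Option.filter, hne]
    · have heq : pvAttrOrder.idxOf kv.1 = 9 := by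
        have := List.idxOf_eq_length hmem
        simpa [pvAttrOrder] using this
      cases hpv : pvVal? kv.2 <;>
        simp [pvToPair, hskip, hmem, hpv, Option.filter]
      all_goals decide

-- a listed-priority bucket holds exactly the value of its one key
theorem pv_bucket_fun (key : String) (c : Int) (hq : ((pvAttrOrder.idxOf key : Nat) : Int) = c)
    (hq9 : pvAttrOrder.idxOf key < 9) (hskipk : key ∉ pvSkipKeys) (kv : String × Option String) :
    ((pvToPair kv).filter (fun p => p.1 == c)).map (fun x => x.2)
    = (if kv.1 = key then pvVal? kv.2 else none) := by
  have hlen : pvAttrOrder.length = 9 := rfl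
  by_cases h : kv.1 = key
  · subst h
    cases hpv : pvVal? kv.2 <;>
      simp [pvToPair, hskipk, hpv, Option.filter, hq]
  · by_cases hskip : kv.1 ∈ pvSkipKeys
    · simp [pvToPair, hskip, h]
    · have hne : ¬ ((pvAttrOrder.idxOf kv.1 : Int) = c) := by
        intro he
        rw [← hq] at he
        have hqq : pvAttrOrder.idxOf kv.1 = pvAttrOrder.idxOf key := by exact_mod_cast he
        have hlt : pvAttrOrder.idxOf kv.1 < pvAttrOrder.length := by
          rw [hqq, hlen]; exact hq9
        have hlt2 : pvAttrOrder.idxOf key < pvAttrOrder.length := by rw [hlen]; exact hq9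
        have h1 : pvAttrOrder[pvAttrOrder.idxOf kv.1] = kv.1 := List.getElem_idxOf hlt
        have h2 : pvAttrOrder[pvAttrOrder.idxOf key] = key := List.getElem_idxOf hlt2
        apply h
        rw [← h1, ← h2]
        simp [hqq]
      cases hpv : pvVal? kv.2 <;>
        simp [pvToPair, hskip, h, hpv, Option.filter, hne]

-- inside the dict's item list, "listed and appended by loop 1" means "listed with a usable value"
theorem pv_rest_congr (d : PySem.Dict String (Option String)) (h : d.keys.Nodup) :
    d.items.filterMap (fun kv =>
      if kv.1 ∈ pvSkipKeys ∨ kv.1 ∈ pvAttrOrder.filter (fun k => (pvLk d k).isSome) then none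
      else pvVal? kv.2)
    = d.items.filterMap (fun kv =>
      if kv.1 ∈ pvSkipKeys ∨ kv.1 ∈ pvAttrOrder then none else pvVal? kv.2) := by
  apply List.filterMap_congr
  intro x hx
  have hget : d.get? x.1 = some x.2 := by
    apply PySem.Dict.get?_of_mem_items d _ h
    simpa using hx
  have hlk : pvLk d x.1 = pvVal? x.2 := by simp [pvLk, hget]
  by_cases hskip : x.1 ∈ pvSkipKeys
  · simp [hskip]
  · by_cases hmem : x.1 ∈ pvAttrOrder
    · by_cases hsome : (pvLk d x.1).isSome
      · simp [hskip, hmem, List.mem_filter, hsome]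
      · have : pvVal? x.2 = none := by
          rw [← hlk]; exact Option.not_isSome_iff_eq_none.mp hsome
        simp [hskip, hmem, List.mem_filter, hsome, this]
    · have : x.1 ∉ pvAttrOrder.filter (fun k => (pvLk d k).isSome) := by
        intro hc
        exact hmem (List.mem_of_mem_filter hc)
      simp [hskip, hmem, this]

theorem pv_bucket_eq (l : List (String × Option String)) (hnd : (l.map (fun p => p.1)).Nodup)
    (key : String) (c : Int) (hq : ((pvAttrOrder.idxOf key : Nat) : Int) = c)
    (hq9 : pvAttrOrder.idxOf key < 9) (hskipk : key ∉ pvSkipKeys) :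
    l.filterMap (fun kv => ((pvToPair kv).filter (fun p => p.1 == c)).map (fun x => x.2))
    = (((PySem.Dict.mk l).get? key).bind pvVal?).toList := by
  rw [List.filterMap_congr (fun x _ => pv_bucket_fun key c hq hq9 hskipk x)]
  exact pv_single key l hnd

theorem pv_main (d : PySem.Dict String (Option String)) (h : d.keys.Nodup) :
    (d.items.foldl (fun st kv =>
      if kv.1 ∈ pvSkipKeys then st
      else match kv.2 with
      | none => st
      | some s =>
        if s = "" then st
        else if kv.1 ∈ st.2 then st
        else
          let v := PySem.Str.strip s
          if v ≠ "" then (st.1 ++ [v], st.2.add kv.1) else st)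
      (pvAttrOrder.foldl (fun st k =>
        match d.get? k with
        | some (some s) =>
          if s = "" then st
          else
            let v := PySem.Str.strip s
            if v ≠ "" ∧ k ∉ st.2 then (st.1 ++ [v], st.2.add k) else st
        | _ => st) ([], PySem.Set.ofList []))).1
    = (PySem.List.pyRange 0 (pvAttrOrder.length + 1) 1).foldl (fun acc p => acc ++
        (d.items.foldl (fun g kv =>
          if kv.1 ∈ pvSkipKeys then g
          else match kv.2 with
          | none => g
          | some s =>
            if s = "" then g
            else
              let t := PySem.Str.strip s
              if t ≠ "" then g.modify (pvAttrOrder.idxOf kv.1 : Int) [] (· ++ [t]) else g)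
          PySem.Dict.empty).getD p []) [] := by
  have hnd : (d.items.map (fun p => p.1)).Nodup := by
    simpa [PySem.Dict.keys] using h
  have hmk : (PySem.Dict.mk d.items) = d := PySem.Dict.ext rfl
  rw [pv_loopA1 d pvAttrOrder [] (PySem.Set.ofList []) (by decide)
    (by intro k _; simp [PySem.Set.ofList])]
  rw [show PySem.Set.ofList ([] : List String) = [] from rfl]
  simp only [List.nil_append]
  rw [pv_loopA2 d.items _ _ hnd]
  rw [pv_rest_congr d h]
  rw [pv_loopB d.items PySem.Dict.empty]
  rw [show PySem.List.pyRange 0 (pvAttrOrder.length + 1) 1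
      = [0, 1, 2, 3, 4, 5, 6, 7, 8, 9] by decide]
  simp only [List.foldl_cons, List.foldl_nil, List.nil_append]
  simp only [PySem.Dict.getD_foldl_modify_append, PySem.Dict.getD_empty, List.nil_append]
  simp only [List.filter_filterMap, List.map_filterMap]
  rw [pv_bucket_eq d.items hnd "style" 0 (by decide) (by decide) (by decide),
    pv_bucket_eq d.items hnd "colour" 1 (by decide) (by decide) (by decide),
    pv_bucket_eq d.items hnd "color" 2 (by decide) (by decide) (by decide),
    pv_bucket_eq d.items hnd "size" 3 (by decide) (by decide) (by decide),
    pv_bucket_eq d.items hnd "wattage" 4 (by decide) (by decide) (by decide),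
    pv_bucket_eq d.items hnd "fitting" 5 (by decide) (by decide) (by decide),
    pv_bucket_eq d.items hnd "cap" 6 (by decide) (by decide) (by decide),
    pv_bucket_eq d.items hnd "finish" 7 (by decide) (by decide) (by decide),
    pv_bucket_eq d.items hnd "material" 8 (by decide) (by decide) (by decide)]
  rw [List.filterMap_congr (l := d.items) (fun x _ => pv_bucket9_fun x)]
  rw [hmk]
  rw [pv_filterMap_eq_flatMap (pvLk d) pvAttrOrder]
  rw [show pvAttrOrder
      = ["style", "colour", "color", "size", "wattage", "fitting", "cap", "finish", "material"]
      from rfl]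
  simp only [List.flatMap_cons, List.flatMap_nil, pvLk, List.append_nil]
  simp [List.append_assoc]

-- ===== VERDICT (by name: the statement is the Claim_ definition above) =====
theorem suggest_title_spec : Claim_equal_suggest_title := by
  intro cluster_id primary_intent attributes _
  unfold Spec_suggest_title suggest_title suggest_title_alt
  simp only []
  rw [pv_main (PySem.Dict.ofList attributes) (PySem.Dict.nodup_keys_ofList attributes)]
  rw [pv_first_val, pv_first_val]
  rw [pv_before_eq]
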